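-- pv_equiv track=rewrite | github.com/Ajay-Talbot/high-throughput-AM | High throughput Dashboard/Single_tracks_uploadable_format.py | calculate_track_positions
-- ===== SOURCE A (Python) =====
-- def calculate_track_positions(length, width, num_tracks, track_length, track_spacing):
--     track_positions = []
--     edge_offset = 2  # 2mm from the edge
--     current_x = edge_offset
--     current_y = edge_offset
--     track_count = 0
--
--     while track_count < num_tracks:
--         if current_x + track_spacing > width - edge_offset:  # Check if the track fits in the current line
--             current_x = edge_offset  # Reset to the start of the line
--             current_y += track_length + 2  # Move to the next line with 2mm gap
--
--         if current_y + track_length > length - edge_offset:  # Stop if it exceeds the length of the substrate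
--             break
--
--         track_positions.append((current_x, current_y))
--         current_x += track_spacing
--         track_count += 1
--
--     return track_positions
-- ===== SOURCE B (Python) =====
-- def calculate_track_positions(length, width, num_tracks, track_length, track_spacing):
--     positions = []
--     edge_offset = 2  # 2mm from the edge
--     count = 0
--     y = edge_offset
--     while count < num_tracks and y + track_length <= length - edge_offset:
--         positions.append((edge_offset, y))          # row opener at x = 2
--         count += 1
--         x = edge_offset + track_spacing
--         while x + track_spacing <= width - edge_offset and count < num_tracks:
--             positions.append((x, y))
--             count += 1
--             x += track_spacing
--         y += track_length + 2                       # next row, 2mm gap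
--     return positions
-- ===== Notes on version B (the rewrite author's own statement) =====
-- stated objective: alternative
-- what changed: Replaced A's single flat loop with mutable wrap logic by an explicit two-level decomposition: an outer row loop that advances y and checks the length bound once per row, and an inner loop that lays out the remaining x positions of one row by repeated addition of track_spacing.
-- intended difference: On degenerate widths where the wrap test fires already at the opening column (track_spacing > width-4, with num_tracks >= 1, track_length != -2 and at least one row fitting), A bumps y before placing any track so the whole layout starts one row down (the y=2 row is skipped, e.g. A=[(2,5)] vs B=[(2,2),(2,5)]); B starts the grid at the edge offset y=2, which is the intended placement. — e.g. on calculate_track_positions(10, 3, 2, 1, 1): A returns [(2, 5)], B returns [(2, 2), (2, 5)]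
import Mathlib
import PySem

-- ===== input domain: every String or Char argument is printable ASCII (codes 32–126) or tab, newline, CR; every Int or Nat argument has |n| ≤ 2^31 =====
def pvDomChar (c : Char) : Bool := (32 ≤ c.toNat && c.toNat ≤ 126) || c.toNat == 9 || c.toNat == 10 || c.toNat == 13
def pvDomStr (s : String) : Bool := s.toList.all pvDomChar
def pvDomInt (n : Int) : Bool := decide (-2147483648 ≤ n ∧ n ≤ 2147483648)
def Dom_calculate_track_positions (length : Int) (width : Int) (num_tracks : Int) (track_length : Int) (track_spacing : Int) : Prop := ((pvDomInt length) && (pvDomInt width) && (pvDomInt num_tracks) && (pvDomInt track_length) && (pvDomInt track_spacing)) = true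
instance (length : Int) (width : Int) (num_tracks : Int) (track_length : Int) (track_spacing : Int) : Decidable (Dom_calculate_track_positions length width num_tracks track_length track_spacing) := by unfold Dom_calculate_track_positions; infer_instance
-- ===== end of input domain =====

-- B re-decomposes A's single flat wrap loop into two nested loops (an outer row loop, an
-- inner in-row loop); same cost ("alternative"); on degenerate widths (see D_) A starts the
-- grid one row down and B starts it at the edge offset, which is the intended placement.

-- ===== PORT A =====
-- A's while loop appends exactly once per iteration and increments track_count,
-- so it runs at most num_tracks.toNat iterations: that is the fuel.
def pvLoopA (length width track_length track_spacing : Int)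
    (fuel : Nat) (x y : Int) (acc : List (Int × Int)) : List (Int × Int) :=
  match fuel with
  | 0 => acc
  | f + 1 =>
    let x' := if x + track_spacing > width - 2 then 2 else x
    let y' := if x + track_spacing > width - 2 then y + track_length + 2 else y
    if y' + track_length > length - 2 then acc
    else pvLoopA length width track_length track_spacing f
          (x' + track_spacing) y' (acc ++ [(x', y')])

def calculate_track_positions (length : Int) (width : Int) (num_tracks : Int) (track_length : Int) (track_spacing : Int) : List (Int × Int) :=
  pvLoopA length width track_length track_spacing num_tracks.toNat 2 2 []

-- ===== PORT B =====
-- inner row loop: the in-row positions after the opener, plus the remaining fuel (count)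
def pvInnerB (width track_spacing y : Int) (fuel : Nat) (x : Int) : List (Int × Int) × Nat :=
  match fuel with
  | 0 => ([], 0)
  | f + 1 =>
    if x + track_spacing ≤ width - 2 then
      let r := pvInnerB width track_spacing y f (x + track_spacing)
      ((x, y) :: r.1, r.2)
    else ([], f + 1)

theorem pvInnerB_fuel_le (width track_spacing y : Int) (fuel : Nat) (x : Int) :
    (pvInnerB width track_spacing y fuel x).2 ≤ fuel := by
  induction fuel generalizing x with
  | zero => simp [pvInnerB]
  | succ f ih =>
    simp only [pvInnerB]
    split
    · exact Nat.le_succ_of_le (ih _)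
    · exact Nat.le_refl _

-- outer row loop: check the length bound, emit the opener and the row, advance y
def pvOuterB (length width track_length track_spacing : Int)
    (fuel : Nat) (y : Int) : List (Int × Int) :=
  match fuel with
  | 0 => []
  | f + 1 =>
    if y + track_length > length - 2 then []
    else
      let row := pvInnerB width track_spacing y f (2 + track_spacing)
      (2, y) :: row.1 ++
        pvOuterB length width track_length track_spacing row.2 (y + track_length + 2)
decreasing_by exact Nat.lt_succ_of_le (pvInnerB_fuel_le _ _ _ _ _)

def calculate_track_positions_alt (length : Int) (width : Int) (num_tracks : Int) (track_length : Int) (track_spacing : Int) : List (Int × Int) :=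
  pvOuterB length width track_length track_spacing num_tracks.toNat 2

-- ===== PRECONDITION & SPEC =====
-- On degenerate widths where the wrap test fires already at the opening column
-- (track_spacing > width-4, num_tracks ≥ 1, track_length ≠ -2, at least one row fitting),
-- A bumps y before placing any track so the whole layout starts one row down (the y=2 row
-- is skipped); B starts the grid at the edge offset y=2, which is the intended placement.
def D_calculate_track_positions (length : Int) (width : Int) (num_tracks : Int) (track_length : Int) (track_spacing : Int) : Prop :=
  2 + track_spacing > width - 2 ∧ 1 ≤ num_tracks ∧ track_length ≠ -2 ∧
    (2 + track_length ≤ length - 2 ∨ 4 + 2 * track_length ≤ length - 2)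
instance (length : Int) (width : Int) (num_tracks : Int) (track_length : Int) (track_spacing : Int) : Decidable (D_calculate_track_positions length width num_tracks track_length track_spacing) := by unfold D_calculate_track_positions; infer_instance

def Spec_calculate_track_positions (length : Int) (width : Int) (num_tracks : Int) (track_length : Int) (track_spacing : Int) (out : List (Int × Int)) : Prop := ¬ D_calculate_track_positions length width num_tracks track_length track_spacing → out = calculate_track_positions_alt length width num_tracks track_length track_spacing
instance (length : Int) (width : Int) (num_tracks : Int) (track_length : Int) (track_spacing : Int) (out : List (Int × Int)) : Decidable (Spec_calculate_track_positions length width num_tracks track_length track_spacing out) := by unfold Spec_calculate_track_positions; infer_instance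

def pvDiffWitness_calculate_track_positions : Int × Int × Int × Int × Int := (10, 3, 2, 1, 1)
def pvDiffWitnessOut_calculate_track_positions : (List (Int × Int)) × (List (Int × Int)) := ([(2, 5)], [(2, 2), (2, 5)])

-- ===== CLAIM =====
def Claim_unchanged_calculate_track_positions : Prop := ∀ (length : Int) (width : Int) (num_tracks : Int) (track_length : Int) (track_spacing : Int), Dom_calculate_track_positions length width num_tracks track_length track_spacing → Spec_calculate_track_positions length width num_tracks track_length track_spacing (calculate_track_positions length width num_tracks track_length track_spacing)
def Claim_changed_calculate_track_positions : Prop := Dom_calculate_track_positions (pvDiffWitness_calculate_track_positions.1) (pvDiffWitness_calculate_track_positions.2.1) (pvDiffWitness_calculate_track_positions.2.2.1) (pvDiffWitness_calculate_track_positions.2.2.2.1) (pvDiffWitness_calculate_track_positions.2.2.2.2) ∧ D_calculate_track_positions (pvDiffWitness_calculate_track_positions.1) (pvDiffWitness_calculate_track_positions.2.1) (pvDiffWitness_calculate_track_positions.2.2.1) (pvDiffWitness_calculate_track_positions.2.2.2.1) (pvDiffWitness_calculate_track_positions.2.2.2.2) ∧ calculate_track_positions (pvDiffWitness_calculate_track_positions.1)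 (pvDiffWitness_calculate_track_positions.2.1) (pvDiffWitness_calculate_track_positions.2.2.1) (pvDiffWitness_calculate_track_positions.2.2.2.1) (pvDiffWitness_calculate_track_positions.2.2.2.2) = pvDiffWitnessOut_calculate_track_positions.1 ∧ calculate_track_positions_alt (pvDiffWitness_calculate_track_positions.1) (pvDiffWitness_calculate_track_positions.2.1) (pvDiffWitness_calculate_track_positions.2.2.1) (pvDiffWitness_calculate_track_positions.2.2.2.1) (pvDiffWitness_calculate_track_positions.2.2.2.2) = pvDiffWitnessOut_calculate_track_positions.2 ∧ pvDiffWitnessOut_calculate_track_positions.1 ≠ pvDiffWitnessOut_calculate_track_positions.2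
def Claim_exact_calculate_track_positions : Prop := ∀ (length : Int) (width : Int) (num_tracks : Int) (track_length : Int) (track_spacing : Int), Dom_calculate_track_positions length width num_tracks track_length track_spacing → D_calculate_track_positions length width num_tracks track_length track_spacing → calculate_track_positions length width num_tracks track_length track_spacing ≠ calculate_track_positions_alt length width num_tracks track_length track_spacing

-- ===== LEMMAS AND PROOFS =====

-- A's accumulator is a pure prefix
theorem pvLoopA_acc (length width track_length track_spacing : Int) :
    ∀ (fuel : Nat) (x y : Int) (acc : List (Int × Int)),
      pvLoopA length width track_length track_spacing fuel x y acc =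
        acc ++ pvLoopA length width track_length track_spacing fuel x y [] := by
  intro fuel
  induction fuel with
  | zero => intro x y acc; simp [pvLoopA]
  | succ f ih =>
    intro x y acc
    simp only [pvLoopA]
    split <;> split
    · simp
    · rw [ih _ _ (acc ++ _)]; simp [ih _ _ [(_, _)]]
    · simp
    · rw [ih _ _ (acc ++ _)]; simp [ih _ _ [(_, _)]]

-- Main invariant: from any A-state (x, y) that is either about to wrap
-- (x + s > width - 2) or lies in a fitting row (y + tl ≤ length - 2),
-- A's flat loop equals the in-row remainder followed by the remaining rows.
theorem pvLoop_eq (length width track_length track_spacing : Int) :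
    ∀ (fuel : Nat) (x y : Int) (acc : List (Int × Int)),
      (x + track_spacing > width - 2 ∨ y + track_length ≤ length - 2) →
      pvLoopA length width track_length track_spacing fuel x y acc =
        acc ++ (pvInnerB width track_spacing y fuel x).1 ++
          pvOuterB length width track_length track_spacing
            (pvInnerB width track_spacing y fuel x).2 (y + track_length + 2) := by
  intro fuel
  induction fuel with
  | zero => intro x y acc _; simp [pvLoopA, pvInnerB, pvOuterB]
  | succ f ih =>
    intro x y acc h
    by_cases hw : x + track_spacing > width - 2
    · -- A wraps: innerB emits nothing, the rest is exactly the next rows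
      simp only [pvLoopA, if_pos hw, pvInnerB, if_neg (not_le.mpr hw)]
      by_cases hf : y + track_length + 2 + track_length > length - 2
      · simp only [pvOuterB, if_pos hf, List.append_nil]
      · rw [not_lt] at hf
        simp only [pvOuterB, if_neg (not_lt.mpr hf)]
        rw [ih (2 + track_spacing) (y + track_length + 2) (acc ++ [(2, y + track_length + 2)])
              (Or.inr hf)]
        simp
    · -- no wrap: the row goes on; y must fit (left disjunct is false)
      have hy : y + track_length ≤ length - 2 := h.resolve_left hw
      rw [not_lt] at hw
      simp only [pvLoopA, if_neg (not_lt.mpr hw), if_neg (not_lt.mpr hy),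
        pvInnerB, if_pos hw]
      rw [ih (x + track_spacing) y (acc ++ [(x, y)]) (Or.inr hy)]
      simp

theorem calculate_track_positions_spec : Claim_unchanged_calculate_track_positions := by
  intro length width num_tracks track_length track_spacing _
  unfold Spec_calculate_track_positions
  intro hD
  unfold calculate_track_positions calculate_track_positions_alt
  by_cases hw : (2 : Int) + track_spacing > width - 2
  · -- degenerate width: A wraps before the very first track; ¬D_ forces agreement
    cases hn : num_tracks.toNat with
    | zero => simp [pvLoopA, pvOuterB]
    | succ f =>
      have hn1 : (1 : Int) ≤ num_tracks := by omega
      have hrest : track_length = -2 ∨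
          (¬ (2 + track_length ≤ length - 2) ∧ ¬ (4 + 2 * track_length ≤ length - 2)) := by
        unfold D_calculate_track_positions at hD
        by_cases htl : track_length = -2
        · exact Or.inl htl
        · right
          constructor
          · intro h1; exact hD ⟨hw, hn1, htl, Or.inl h1⟩
          · intro h2; exact hD ⟨hw, hn1, htl, Or.inr h2⟩
      rcases hrest with htl | ⟨hf1, hf2⟩
      · -- track_length = -2: the wrap leaves y unchanged, both lay the same grid at y = 2
        subst htl
        by_cases hy : (2 : Int) + -2 > length - 2
        · simp only [pvLoopA, pvOuterB, if_pos hw]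
          norm_num at hy ⊢
          simp [hy]
        · rw [not_lt] at hy
          simp only [pvLoopA, if_pos hw,
            show (2 : Int) + -2 + 2 = 2 by ring, if_neg (not_lt.mpr hy)]
          rw [pvLoop_eq length width (-2) track_spacing f (2 + track_spacing) 2 _ (Or.inr hy)]
          simp only [pvOuterB, if_neg (not_lt.mpr hy)]
          simp
      · -- no row fits for either: both empty
        have hyA : (2 : Int) + track_length + 2 + track_length > length - 2 := by omega
        have hyB : (2 : Int) + track_length > length - 2 := by omega
        simp [pvLoopA, pvOuterB, if_pos hw, hyA, hyB]
  · rw [not_lt] at hw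
    by_cases hy : (2 : Int) + track_length > length - 2
    · -- first row does not fit: both return []
      cases hn : num_tracks.toNat with
      | zero => simp [pvLoopA, pvOuterB]
      | succ f => simp [pvLoopA, pvOuterB, if_neg (not_lt.mpr hw), if_pos hy]
    · rw [not_lt] at hy
      rw [pvLoop_eq length width track_length track_spacing num_tracks.toNat 2 2 [] (Or.inr hy)]
      cases hn : num_tracks.toNat with
      | zero => simp [pvInnerB, pvOuterB]
      | succ f =>
        simp only [pvInnerB, if_pos hw, pvOuterB, if_neg (not_lt.mpr hy), List.nil_append]

theorem calculate_track_positions_changed : Claim_changed_calculate_track_positions := by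
  unfold Claim_changed_calculate_track_positions
  refine ⟨by decide, by decide, by decide, ?_, by decide⟩
  show calculate_track_positions_alt 10 3 2 1 1 = [(2, 2), (2, 5)]
  simp [calculate_track_positions_alt, pvOuterB, pvInnerB]

theorem calculate_track_positions_tight : Claim_exact_calculate_track_positions := by
  intro length width num_tracks track_length track_spacing _ hD
  obtain ⟨hw, hn, htl, hfit⟩ := hD
  obtain ⟨f, hf⟩ : ∃ f, num_tracks.toNat = f + 1 := by
    refine ⟨num_tracks.toNat - 1, ?_⟩; omega
  unfold calculate_track_positions calculate_track_positions_alt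
  rw [hf]
  -- head of A (if any) is (2, 2+track_length+2); head of B (if any) is (2, 2)
  by_cases hyA : (2 : Int) + track_length + 2 + track_length > length - 2
  · -- A is empty
    have hyB : ¬ ((2 : Int) + track_length > length - 2) := by
      rcases hfit with h | h
      · omega
      · omega
    simp [pvLoopA, pvOuterB, if_pos hw, hyA, hyB]
  · rw [not_lt] at hyA
    by_cases hyB : (2 : Int) + track_length > length - 2
    · -- B is empty, A is not
      simp only [pvLoopA, pvOuterB, if_pos hw, if_neg (not_lt.mpr hyA), if_pos hyB]
      rw [pvLoopA_acc length width track_length track_spacing f]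
      simp
    · -- both nonempty with different heads
      simp only [pvLoopA, pvOuterB, if_pos hw, if_neg (not_lt.mpr hyA), if_neg hyB]
      rw [pvLoopA_acc length width track_length track_spacing f]
      intro h
      have := List.head_eq_of_cons_eq h.symm
      have : (2 : Int) + track_length + 2 = 2 := by
        simpa using congrArg Prod.snd this.symm
      omega
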